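-- pv_equiv track=rewrite | github.com/DrTechtainiumToo/CampStaffScheduler | code_root/backend/core/time_processes.py | insert_time_slot_at_position
-- ===== SOURCE A (Python) =====
-- def insert_time_slot_at_position(day_time_slots, new_time, reference_time, position='after'): #TODO should i remove 'after', do i need keyword args???
--     """
--     GPT4 assist on this one bc im lazy.
--     Inserts a new time slot relative to a reference time slot in an ordered dictionary.
--
--     Args:
--     day_time_slots (dict): The original dictionary of time slots.
--     new_time (str): New time slot to insert (e.g., '10:30').
--     reference_time (str): Reference time slot to base the insertion on (e.g., '9:15').
--     position (str): Specifies whether to insert before or after the reference time ('before' or 'after').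
--     """
--
--     new_day_time_slots = {}
--     inserted = False
--
--     for time, available in day_time_slots.items():
--         if time == reference_time and position == 'before':
--             new_day_time_slots[new_time] = True  # Assuming the new time slot is available
--             inserted = True
--         new_day_time_slots[time] = available
--         if time == reference_time and position == 'after':
--             new_day_time_slots[new_time] = True  # Insert after the current item
--             inserted = True
--
--     # If reference_time was not found or new_time is to be added at the end
--     if not inserted:
--         new_day_time_slots[new_time] = True
--
--     return new_day_time_slots
-- ===== SOURCE B (Python) =====
-- def insert_time_slot_at_position(day_time_slots, new_time, reference_time, position='after'):
--     pairs = list(day_time_slots.items())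
--     keys = [t for t, _ in pairs]
--     i = keys.index(reference_time) if reference_time in keys else None
--     if i is not None and position in ('before', 'after'):
--         pairs.insert(i if position == 'before' else i + 1, (new_time, True))
--     else:
--         pairs.append((new_time, True))
--     return dict(pairs)
-- ===== Notes on version B (the rewrite author's own statement) =====
-- stated objective: simpler
-- what changed: Replaces A's flag-driven streaming rebuild of the dict with an index-and-splice decomposition: find the reference key's index, insert (new_time, True) at that index (or after it) into the list of pairs, else append, and rebuild with dict(pairs).
import Mathlib
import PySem

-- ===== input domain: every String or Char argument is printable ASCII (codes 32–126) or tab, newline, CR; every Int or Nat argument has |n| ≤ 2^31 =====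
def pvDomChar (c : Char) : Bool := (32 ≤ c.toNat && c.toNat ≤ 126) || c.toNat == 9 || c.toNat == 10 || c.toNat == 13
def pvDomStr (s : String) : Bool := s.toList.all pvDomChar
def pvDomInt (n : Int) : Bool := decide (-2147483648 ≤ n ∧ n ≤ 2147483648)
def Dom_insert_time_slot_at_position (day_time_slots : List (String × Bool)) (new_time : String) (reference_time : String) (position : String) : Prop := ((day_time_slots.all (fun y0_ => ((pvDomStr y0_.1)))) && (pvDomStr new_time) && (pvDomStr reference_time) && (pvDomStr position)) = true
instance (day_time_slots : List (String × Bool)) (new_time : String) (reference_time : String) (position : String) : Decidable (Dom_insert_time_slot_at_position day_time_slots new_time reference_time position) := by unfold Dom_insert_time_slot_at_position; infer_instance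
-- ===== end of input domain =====

-- B replaces A's flag-driven streaming rebuild with an index-and-splice decomposition (same O(n) cost; objective: simpler).

-- ===== PORT A =====
def insert_time_slot_at_position (day_time_slots : List (String × Bool)) (new_time : String) (reference_time : String) (position : String) : List (String × Bool) :=
  -- for time, available in day_time_slots.items(): … (dict writes are PySem.Dict.insert: overwrite keeps position)
  let r := day_time_slots.foldl (fun (st : PySem.Dict String Bool × Bool) tv =>
    let st1 := if tv.1 == reference_time && position == "before" then (st.1.insert new_time true, true) else st
    let st2 := (st1.1.insert tv.1 tv.2, st1.2)
    if tv.1 == reference_time && position == "after" then (st2.1.insert new_time true, true) else st2)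
    (PySem.Dict.empty, false)
  (if r.2 then r.1 else r.1.insert new_time true).items

-- ===== PORT B =====
def insert_time_slot_at_position_alt (day_time_slots : List (String × Bool)) (new_time : String) (reference_time : String) (position : String) : List (String × Bool) :=
  let pairs := day_time_slots
  let keys := pairs.map Prod.fst
  let i? := PySem.List.index? keys reference_time   -- i = keys.index(reference_time) if reference_time in keys else None
  let pairs' :=
    match i? with
    | some i =>
      if position == "before" || position == "after" then
        PySem.List.insert pairs (if position == "before" then (i : Int) else (i : Int) + 1) (new_time, true)
      else pairs ++ [(new_time, true)]
    | none => pairs ++ [(new_time, true)]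
  (PySem.Dict.ofList pairs').items

-- ===== PRECONDITION & SPEC =====
-- Pre_ only requires that the association list represents a Python dict (distinct keys); every dict
-- argument the Python function can receive satisfies it, so no input A returns on is excluded.
def Pre_insert_time_slot_at_position (day_time_slots : List (String × Bool)) (new_time : String) (reference_time : String) (position : String) : Prop :=
  (day_time_slots.map Prod.fst).Nodup
instance (day_time_slots : List (String × Bool)) (new_time : String) (reference_time : String) (position : String) : Decidable (Pre_insert_time_slot_at_position day_time_slots new_time reference_time position) := by unfold Pre_insert_time_slot_at_position; infer_instance

def pvWitness_insert_time_slot_at_position : (List (String × Bool)) × String × String × String :=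
  ([("9:00", true), ("9:15", false)], "10:30", "9:15", "after")

def Spec_insert_time_slot_at_position (day_time_slots : List (String × Bool)) (new_time : String) (reference_time : String) (position : String) (out : List (String × Bool)) : Prop := out = insert_time_slot_at_position_alt day_time_slots new_time reference_time position
instance (day_time_slots : List (String × Bool)) (new_time : String) (reference_time : String) (position : String) (out : List (String × Bool)) : Decidable (Spec_insert_time_slot_at_position day_time_slots new_time reference_time position out) := by unfold Spec_insert_time_slot_at_position; infer_instance

-- ===== CLAIM (what is proved, stated in full; the proofs are below) =====
def Claim_equal_insert_time_slot_at_position : Prop := ∀ (day_time_slots : List (String × Bool)) (new_time : String) (reference_time : String) (position : String), Dom_insert_time_slot_at_position day_time_slots new_time reference_time position → Pre_insert_time_slot_at_position day_time_slots new_time reference_time position → Spec_insert_time_slot_at_position day_time_slots new_time reference_time position (insert_time_slot_at_position day_time_slots new_time reference_time position)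

-- ===== LEMMAS AND PROOFS =====

-- A's loop step, abstracted over the loop parameters.
def pvStepA (new_time reference_time position : String) (st : PySem.Dict String Bool × Bool) (tv : String × Bool) : PySem.Dict String Bool × Bool :=
  let st1 := if tv.1 == reference_time && position == "before" then (st.1.insert new_time true, true) else st
  let st2 := (st1.1.insert tv.1 tv.2, st1.2)
  if tv.1 == reference_time && position == "after" then (st2.1.insert new_time true, true) else st2

-- the plain insertion fold that dict(pairs) performs
def pvIns (d : PySem.Dict String Bool) (l : List (String × Bool)) : PySem.Dict String Bool :=
  l.foldl (fun d p => d.insert p.1 p.2) d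

theorem pvStepA_no_ref (nt rt pos : String) (l : List (String × Bool))
    (h : ∀ p ∈ l, p.1 ≠ rt) (st : PySem.Dict String Bool × Bool) :
    l.foldl (pvStepA nt rt pos) st = (pvIns st.1 l, st.2) := by
  induction l generalizing st with
  | nil => rfl
  | cons p l ih =>
    have hp : (p.1 == rt) = false := by
      simp only [beq_eq_false_iff_ne]; exact h p (List.mem_cons_self)
    simp only [List.foldl_cons, pvStepA, hp, Bool.false_and, if_false, pvIns]
    exact ih (fun q hq => h q (List.mem_cons_of_mem _ hq)) _

theorem pvStepA_bad_pos (nt rt pos : String) (hb : (pos == "before") = false)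
    (ha : (pos == "after") = false) (l : List (String × Bool)) (st : PySem.Dict String Bool × Bool) :
    l.foldl (pvStepA nt rt pos) st = (pvIns st.1 l, st.2) := by
  induction l generalizing st with
  | nil => rfl
  | cons p l ih =>
    simp only [List.foldl_cons, pvStepA, hb, ha, Bool.and_false, pvIns]
    exact ih _

theorem pvOfList_eq_pvIns (l : List (String × Bool)) : PySem.Dict.ofList l = pvIns PySem.Dict.empty l := rfl

theorem insert_time_slot_at_position_spec' (l : List (String × Bool)) (nt rt pos : String)
    (hnd : (l.map Prod.fst).Nodup) :
    insert_time_slot_at_position l nt rt pos = insert_time_slot_at_position_alt l nt rt pos := by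
  unfold insert_time_slot_at_position insert_time_slot_at_position_alt
  rcases hidx : PySem.List.index? (l.map Prod.fst) rt with _ | i
  · -- reference not found: every key differs from rt
    have hmem : rt ∉ l.map Prod.fst := (PySem.List.index?_eq_none_iff _ _).1 hidx
    have hne : ∀ p ∈ l, p.1 ≠ rt := by
      intro p hp hpe; exact hmem (hpe ▸ List.mem_map_of_mem hp)
    simp only [hidx, pvOfList_eq_pvIns]
    rw [show (l.foldl (fun (st : PySem.Dict String Bool × Bool) tv =>
        let st1 := if tv.1 == rt && pos == "before" then (st.1.insert nt true, true) else st
        let st2 := (st1.1.insert tv.1 tv.2, st1.2)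
        if tv.1 == rt && pos == "after" then (st2.1.insert nt true, true) else st2)
        (PySem.Dict.empty, false)) = l.foldl (pvStepA nt rt pos) (PySem.Dict.empty, false) from rfl,
      pvStepA_no_ref nt rt pos l hne]
    simp [pvIns, List.foldl_append]
  · -- reference found at index i
    obtain ⟨pre', suf', hsplit, hlen, hnotmem⟩ := (PySem.List.index?_eq_some_iff _ _ _).1 hidx
    obtain ⟨pre, rest, hl, hpre, hrest⟩ := List.map_eq_append_iff.1 hsplit
    obtain ⟨x, suf, hr, hx, hsuf⟩ := List.map_eq_cons_iff.1 hrest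
    subst hl hr
    have hprelen : pre.length = i := by rw [← hlen, ← hpre, List.length_map]
    have hprene : ∀ p ∈ pre, p.1 ≠ rt := by
      intro p hp hpe
      exact hnotmem (hpre ▸ hpe ▸ List.mem_map_of_mem hp)
    have hsufne : ∀ p ∈ suf, p.1 ≠ rt := by
      have : rt ∉ suf.map Prod.fst := by
        have h2 := hnd
        rw [List.map_append, List.map_cons, hx] at h2
        exact (List.nodup_cons.1 h2.of_append_right).1
      intro p hp hpe; exact this (hpe ▸ List.mem_map_of_mem hp)
    by_cases hb : pos = "before"
    · subst hb
      simp only [hidx]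
      rw [show ((pre ++ x :: suf).foldl (fun (st : PySem.Dict String Bool × Bool) tv =>
          let st1 := if tv.1 == rt && ("before" : String) == "before" then (st.1.insert nt true, true) else st
          let st2 := (st1.1.insert tv.1 tv.2, st1.2)
          if tv.1 == rt && ("before" : String) == "after" then (st2.1.insert nt true, true) else st2)
          (PySem.Dict.empty, false)) = (pre ++ x :: suf).foldl (pvStepA nt rt "before") (PySem.Dict.empty, false) from rfl]
      rw [List.foldl_append, pvStepA_no_ref nt rt "before" pre hprene, List.foldl_cons,
        show pvStepA nt rt "before" (pvIns PySem.Dict.empty pre, false) x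
            = (((pvIns PySem.Dict.empty pre).insert nt true).insert x.1 x.2, true) from by
          simp [pvStepA, hx],
        pvStepA_no_ref nt rt "before" suf hsufne]
      rw [show (if (("before" : String) == "before") = true then ((i : Int)) else ((i : Int)) + 1)
            = ((i : Int)) from by rw [if_pos (by decide)]]
      rw [← hprelen, PySem.List.insert_natCast _ _ _ (by simp), List.take_left' rfl,
        List.drop_left' rfl]
      rw [if_pos (by decide : ((("before" : String) == "before") || (("before" : String) == "after")) = true),
        if_pos rfl]
      simp [pvOfList_eq_pvIns, pvIns, List.foldl_append]
    · by_cases ha : pos = "after"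
      · subst ha
        simp only [hidx]
        rw [show ((pre ++ x :: suf).foldl (fun (st : PySem.Dict String Bool × Bool) tv =>
            let st1 := if tv.1 == rt && ("after" : String) == "before" then (st.1.insert nt true, true) else st
            let st2 := (st1.1.insert tv.1 tv.2, st1.2)
            if tv.1 == rt && ("after" : String) == "after" then (st2.1.insert nt true, true) else st2)
            (PySem.Dict.empty, false)) = (pre ++ x :: suf).foldl (pvStepA nt rt "after") (PySem.Dict.empty, false) from rfl]
        rw [List.foldl_append, pvStepA_no_ref nt rt "after" pre hprene, List.foldl_cons,
          show pvStepA nt rt "after" (pvIns PySem.Dict.empty pre, false) x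
              = (((pvIns PySem.Dict.empty pre).insert x.1 x.2).insert nt true, true) from by
            simp [pvStepA, hx],
          pvStepA_no_ref nt rt "after" suf hsufne]
        rw [show (if (("after" : String) == "before") = true then ((i : Int)) else ((i : Int)) + 1)
              = (((i + 1 : Nat) : Int)) from by rw [if_neg (by decide)]; push_cast; ring]
        rw [PySem.List.insert_natCast _ _ _ (by simp; omega)]
        rw [show (pre ++ x :: suf).take (i + 1) = pre ++ [x] by
            rw [← hprelen, show pre.length + 1 = (pre ++ [x]).length by simp,
              show pre ++ x :: suf = (pre ++ [x]) ++ suf by simp, List.take_left' rfl],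
          show (pre ++ x :: suf).drop (i + 1) = suf by
            rw [← hprelen, show pre.length + 1 = (pre ++ [x]).length by simp,
              show pre ++ x :: suf = (pre ++ [x]) ++ suf by simp, List.drop_left' rfl]]
        rw [if_pos (by decide : ((("after" : String) == "before") || (("after" : String) == "after")) = true),
          if_pos rfl]
        simp [pvOfList_eq_pvIns, pvIns, List.foldl_append]
      · -- position is neither 'before' nor 'after': A never fires, B appends
        have hb' : (pos == "before") = false := by simp [hb]
        have ha' : (pos == "after") = false := by simp [ha]
        simp only [hidx]
        rw [show ((pre ++ x :: suf).foldl (fun (st : PySem.Dict String Bool × Bool) tv =>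
            let st1 := if tv.1 == rt && pos == "before" then (st.1.insert nt true, true) else st
            let st2 := (st1.1.insert tv.1 tv.2, st1.2)
            if tv.1 == rt && pos == "after" then (st2.1.insert nt true, true) else st2)
            (PySem.Dict.empty, false)) = (pre ++ x :: suf).foldl (pvStepA nt rt pos) (PySem.Dict.empty, false) from rfl,
          pvStepA_bad_pos nt rt pos hb' ha']
        simp [hb', ha', pvOfList_eq_pvIns, pvIns, List.foldl_append]

-- ===== VERDICT (by name: the statement is the Claim_ definition above) =====
theorem insert_time_slot_at_position_spec : Claim_equal_insert_time_slot_at_position := by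
  intro l nt rt pos _ hpre
  exact insert_time_slot_at_position_spec' l nt rt pos hpre
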